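-- pv_equiv track=rewrite | github.com/3211133/ageent_agora_bitothello | tests/test_board_extra.py | mask_from_ascii
-- ===== SOURCE A (Python) =====
-- def mask_from_ascii(board_str: str) -> int:
--     lines = [line.strip() for line in board_str.strip().splitlines()]
--     mask = 0
--     for r, line in enumerate(lines):
--         for c, ch in enumerate(line):
--             if ch != '.':
--                 bit = 1 << (63 - (r * 8 + c))
--                 mask |= bit
--     return mask
-- ===== SOURCE B (Python) =====
-- def mask_from_ascii(board_str: str) -> int:
--     # Row-at-a-time: parse each stripped row (trailing empty cells dropped) as a
--     # binary number and OR it into the mask at the row's anchor offset r*8.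
--     mask = 0
--     for r, line in enumerate(board_str.strip().splitlines()):
--         cells = line.strip().rstrip('.')
--         if cells:
--             row = int(''.join('0' if ch == '.' else '1' for ch in cells), 2)
--             mask |= row << (64 - r * 8 - len(cells))
--     return mask
-- ===== Notes on version B (the rewrite author's own statement) =====
-- stated objective: alternative
-- what changed: Instead of OR-ing one bit per non-'.' cell in a nested char loop, B parses each stripped row (with trailing '.' removed) as a single binary integer and ORs it into the mask at the row's r*8 anchor, one shift/OR per row.
import Mathlib
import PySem

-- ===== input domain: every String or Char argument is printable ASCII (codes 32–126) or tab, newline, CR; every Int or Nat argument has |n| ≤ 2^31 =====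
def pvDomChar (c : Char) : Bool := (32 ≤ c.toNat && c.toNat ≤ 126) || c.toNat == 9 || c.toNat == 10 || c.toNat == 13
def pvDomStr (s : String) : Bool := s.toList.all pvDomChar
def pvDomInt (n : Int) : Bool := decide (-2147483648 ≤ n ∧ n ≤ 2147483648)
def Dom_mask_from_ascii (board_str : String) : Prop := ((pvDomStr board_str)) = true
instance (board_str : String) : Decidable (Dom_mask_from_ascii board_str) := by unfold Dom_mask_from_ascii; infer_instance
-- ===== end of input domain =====

-- B parses each stripped row (trailing '.' cells dropped) as one binary number and ORs it
-- into the mask at the row's anchor r*8 — one OR per row instead of one per set cell (alternative decomposition).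


-- ===== PORT A =====
-- '1 << (63 - (r*8+c))' is ported as '(1:Int) <<< (…).toNat'; Python raises ValueError when the
-- shift is negative, and exactly those inputs are excluded by Pre_mask_from_ascii below.
def mask_from_ascii (board_str : String) : Int :=
  let lines := (PySem.Str.splitlines (PySem.Str.strip board_str)).map PySem.Str.strip
  (PySem.List.enumerate lines).foldl
    (fun mask rl =>
      (PySem.List.enumerate rl.2.toList).foldl
        (fun mask cch =>
          if cch.2 ≠ '.' then
            PySem.Int.bor mask ((1 : Int) <<< (63 - (rl.1 * 8 + cch.1)).toNat)
          else mask)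
        mask)
    0

-- ===== PORT B =====
-- exact port of line.rstrip('.') on the character list
def pyRstripDots (l : List Char) : List Char := (l.reverse.dropWhile (· == '.')).reverse

-- exact port of int(''.join('0' if ch == '.' else '1' for ch in cells), 2): binary parse of the mapped row
def pyRowVal (cells : List Char) : Int :=
  cells.foldl (fun v ch => 2 * v + (if ch == '.' then 0 else 1)) 0

-- 'row << (64 - r*8 - len(cells))' ported as '<<< (…).toNat'; Python raises ValueError on a
-- negative shift, and exactly those inputs are excluded by Pre_mask_from_ascii below.
def mask_from_ascii_alt (board_str : String) : Int :=
  (PySem.List.enumerate (PySem.Str.splitlines (PySem.Str.strip board_str))).foldl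
    (fun mask rl =>
      let cells := pyRstripDots (PySem.Str.strip rl.2).toList
      if cells.isEmpty then mask
      else PySem.Int.bor mask (pyRowVal cells <<< (64 - rl.1 * 8 - (cells.length : Int)).toNat))
    0

-- ===== PRECONDITION & SPEC =====
-- Pre_ excludes exactly the inputs where some board cell with a non-'.' character sits at
-- row*8+col > 63: there Python A raises ValueError and returns nothing (and Python B raises
-- on exactly the same inputs).
def Pre_mask_from_ascii (board_str : String) : Prop :=
  ∀ r < (PySem.Str.splitlines (PySem.Str.strip board_str)).length,
    ∀ c < (PySem.Str.strip ((PySem.Str.splitlines (PySem.Str.strip board_str))[r]!)).toList.length,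
      (PySem.Str.strip ((PySem.Str.splitlines (PySem.Str.strip board_str))[r]!)).toList[c]! ≠ '.' →
        8 * r + c ≤ 63

instance (board_str : String) : Decidable (Pre_mask_from_ascii board_str) := by
  unfold Pre_mask_from_ascii; infer_instance

def pvWitness_mask_from_ascii : String := "X..O....\n.XX.....\n........\n....OO.X"

def Spec_mask_from_ascii (board_str : String) (out : Int) : Prop := out = mask_from_ascii_alt board_str
instance (board_str : String) (out : Int) : Decidable (Spec_mask_from_ascii board_str out) := by unfold Spec_mask_from_ascii; infer_instance

-- ===== CLAIM (what is proved, stated in full; the proofs are below) =====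
def Claim_equal_mask_from_ascii : Prop := ∀ (board_str : String), Dom_mask_from_ascii board_str → Pre_mask_from_ascii board_str → Spec_mask_from_ascii board_str (mask_from_ascii board_str)

-- ===== LEMMAS AND PROOFS =====

-- spec value of one row: the OR of the bits of row r, columns counted from c0
def rowW (r : Nat) : List Char → Nat → Nat
  | [], _ => 0
  | ch :: t, c0 => (if ch = '.' then 0 else 2 ^ (63 - (8 * r + c0))) ||| rowW r t (c0 + 1)

-- the per-row part of Pre_, shifted to start at column c0
def PreRow (r c0 : Nat) (l : List Char) : Prop :=
  ∀ i < l.length, l[i]! ≠ '.' → 8 * r + (c0 + i) ≤ 63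

-- Nat value of the binary parse
def rowVN (l : List Char) : Nat := l.foldl (fun v ch => 2 * v + (if ch = '.' then 0 else 1)) 0

theorem two_pow_lor_of_lt {k b : Nat} (h : b < 2 ^ k) : 2 ^ k ||| b = 2 ^ k + b := by
  have := Nat.shiftLeft_add_eq_or_of_lt (i := k) (b := b) h 1
  simpa [Nat.shiftLeft_eq] using this.symm

theorem rowVN_acc (l : List Char) (a : Nat) :
    l.foldl (fun v ch => 2 * v + (if ch = '.' then 0 else 1)) a = a * 2 ^ l.length + rowVN l := by
  induction l generalizing a with
  | nil => simp [rowVN]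
  | cons ch t ih =>
    simp only [List.foldl_cons, List.length_cons]
    have h2 : rowVN (ch :: t) = (if ch = '.' then 0 else 1) * 2 ^ t.length + rowVN t := by
      simpa [rowVN] using ih (2 * 0 + (if ch = '.' then 0 else 1))
    rw [ih, h2, pow_succ]; ring

theorem pyRowVal_cast (l : List Char) (a : Nat) :
    l.foldl (fun v ch => 2 * (v : Int) + (if ch == '.' then 0 else 1)) (a : Int)
      = ((l.foldl (fun v ch => 2 * v + (if ch = '.' then 0 else 1)) a : Nat) : Int) := by
  induction l generalizing a with
  | nil => simp
  | cons ch t ih =>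
    simp only [List.foldl_cons]
    have hb : (2 * (a : Int) + (if ch == '.' then 0 else 1) : Int)
        = ((2 * a + (if ch = '.' then 0 else 1) : Nat) : Int) := by
      by_cases h2 : ch = '.' <;> simp [h2] <;> push_cast <;> ring
    rw [hb, ih]

theorem rowW_lt (r : Nat) (l : List Char) (c0 : Nat) (h : PreRow r c0 l) :
    rowW r l c0 < 2 ^ (64 - (8 * r + c0)) := by
  induction l generalizing c0 with
  | nil => simpa [rowW] using Nat.pos_pow_of_pos _ (by norm_num)
  | cons ch t ih =>
    have ht : PreRow r (c0 + 1) t := by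
      intro i hi hne
      have := h (i + 1) (by simpa using Nat.succ_lt_succ hi) (by simpa [List.getElem!_cons_succ] using hne)
      omega
    have htail := ih (c0 + 1) ht
    by_cases hch : ch = '.'
    · have : rowW r (ch :: t) c0 = rowW r t (c0 + 1) := by simp [rowW, hch, Nat.zero_or]
      rw [this]
      exact lt_of_lt_of_le htail (Nat.pow_le_pow_right (by norm_num) (by omega))
    · have hhead : 8 * r + c0 ≤ 63 := by
        have := h 0 (by simp) (by simpa [List.getElem!_cons_zero] using hch)
        omega
      have : rowW r (ch :: t) c0 = 2 ^ (63 - (8 * r + c0)) ||| rowW r t (c0 + 1) := by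
        simp [rowW, hch]
      rw [this]
      apply Nat.or_lt_two_pow
      · exact Nat.pow_lt_pow_right (by norm_num) (by omega)
      · exact lt_of_lt_of_le htail (Nat.pow_le_pow_right (by norm_num) (by omega))

theorem rowVN_mul_eq_rowW (r : Nat) (l : List Char) (c0 : Nat)
    (h64 : 8 * r + c0 + l.length ≤ 64) (h : PreRow r c0 l) :
    rowVN l * 2 ^ (64 - (8 * r + c0 + l.length)) = rowW r l c0 := by
  induction l generalizing c0 with
  | nil => simp [rowVN, rowW]
  | cons ch t ih =>
    have ht : PreRow r (c0 + 1) t := by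
      intro i hi hne
      have := h (i + 1) (by simpa using Nat.succ_lt_succ hi) (by simpa [List.getElem!_cons_succ] using hne)
      omega
    have hsplit : rowVN (ch :: t) = (if ch = '.' then 0 else 1) * 2 ^ t.length + rowVN t := by
      simpa [rowVN] using rowVN_acc t (2 * 0 + (if ch = '.' then 0 else 1))
    have h64t : 8 * r + (c0 + 1) + t.length ≤ 64 := by
      have hlen : (ch :: t).length = t.length + 1 := rfl
      omega
    have hIH := ih (c0 + 1) (by omega) ht
    have hexp : 64 - (8 * r + c0 + (ch :: t).length) = 64 - (8 * r + (c0 + 1) + t.length) := by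
      simp [List.length_cons]; omega
    rw [hsplit, hexp, Nat.add_mul, hIH]
    by_cases hch : ch = '.'
    · simp [rowW, hch, Nat.zero_or]
    · have hc63 : 8 * r + c0 ≤ 63 := by simp [List.length_cons] at h64; omega
      have hexp2 : t.length + (64 - (8 * r + (c0 + 1) + t.length)) = 63 - (8 * r + c0) := by omega
      have hlt : rowW r t (c0 + 1) < 2 ^ (63 - (8 * r + c0)) := by
        have := rowW_lt r t (c0 + 1) ht
        have : rowW r t (c0 + 1) < 2 ^ (64 - (8 * r + (c0 + 1))) := this
        exact lt_of_lt_of_le this (Nat.pow_le_pow_right (by norm_num) (by omega))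
      simp only [rowW, hch, if_neg, ite_false, reduceIte]
      rw [one_mul, ← pow_add, hexp2, two_pow_lor_of_lt hlt]

theorem rowW_append (r : Nat) (a b : List Char) (c0 : Nat) :
    rowW r (a ++ b) c0 = rowW r a c0 ||| rowW r b (c0 + a.length) := by
  induction a generalizing c0 with
  | nil => simp [rowW, Nat.zero_or]
  | cons ch t ih =>
    simp only [List.cons_append, rowW, List.length_cons, ih (c0 + 1), Nat.or_assoc]
    have : c0 + (t.length + 1) = c0 + 1 + t.length := by omega
    rw [this]

theorem rowW_dots (r : Nat) (l : List Char) (c0 : Nat) (h : ∀ ch ∈ l, ch = '.') :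
    rowW r l c0 = 0 := by
  induction l generalizing c0 with
  | nil => rfl
  | cons ch t ih =>
    have hch : ch = '.' := h ch (by simp)
    simp [rowW, hch, Nat.zero_or, ih (c0 + 1) (fun x hx => h x (by simp [hx]))]

theorem rstrip_decomp (l : List Char) :
    l = pyRstripDots l ++ (l.reverse.takeWhile (· == '.')).reverse ∧
    (∀ ch ∈ (l.reverse.takeWhile (· == '.')), ch = '.') := by
  constructor
  · conv_lhs => rw [← List.reverse_reverse l, ← List.takeWhile_append_dropWhile
      (p := (· == '.')) (l := l.reverse)]
    rw [List.reverse_append]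
    rfl
  · intro ch hch
    simpa using List.mem_takeWhile_imp hch

theorem rstrip_getLast_ne (l : List Char) (h : pyRstripDots l ≠ []) :
    (pyRstripDots l).getLast h ≠ '.' := by
  unfold pyRstripDots at *
  rw [List.getLast_reverse]
  intro hbad
  have hne : List.dropWhile (fun x => x == '.') l.reverse ≠ [] := by
    intro h0
    exact h (by rw [h0]; rfl)
  have hhead := List.head_dropWhile_not (fun x => x == '.') hne
  simp [hbad] at hhead

-- A's inner loop equals mask ||| rowW
theorem innerA_eq (r : Nat) (l : List Char) (c0 m : Nat) (h : PreRow r c0 l) :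
    (PySem.List.enumerate l (c0 : Int)).foldl
      (fun mask cch =>
        if cch.2 ≠ '.' then
          PySem.Int.bor mask ((1 : Int) <<< ((63 - ((r : Int) * 8 + cch.1)).toNat : Int))
        else mask) (m : Int)
    = ((m ||| rowW r l c0 : Nat) : Int) := by
  simp only [Int.shiftLeft_natCast_right]
  induction l generalizing c0 m with
  | nil => simp [PySem.List.enumerate, rowW, Nat.or_zero]
  | cons ch t ih =>
    have ht : PreRow r (c0 + 1) t := by
      intro i hi hne
      have := h (i + 1) (by simpa using Nat.succ_lt_succ hi) (by simpa [List.getElem!_cons_succ] using hne)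
      omega
    rw [PySem.List.enumerate_cons, List.foldl_cons]
    by_cases hch : ch = '.'
    · have hstep : (if ch ≠ '.' then
          PySem.Int.bor (m : Int) ((1 : Int) <<< (63 - ((r : Int) * 8 + (c0 : Int))).toNat)
        else (m : Int)) = (m : Int) := by simp [hch]
      rw [hstep, show ((c0 : Int) + 1) = ((c0 + 1 : Nat) : Int) by push_cast; ring, ih (c0 + 1) m ht]
      simp [rowW, hch, Nat.zero_or]
    · have hc63 : 8 * r + c0 ≤ 63 := by
        have := h 0 (by simp) (by simpa [List.getElem!_cons_zero] using hch)
        omega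
      have he : (63 - ((r : Int) * 8 + (c0 : Int))).toNat = 63 - (8 * r + c0) := by
        rw [show (63 - ((r : Int) * 8 + (c0 : Int))) = ((63 - (8 * r + c0) : Nat) : Int) by push_cast; omega]
        exact Int.toNat_natCast _
      have hstep : (if ch ≠ '.' then
          PySem.Int.bor (m : Int) ((1 : Int) <<< (63 - ((r : Int) * 8 + (c0 : Int))).toNat)
        else (m : Int)) = ((m ||| 2 ^ (63 - (8 * r + c0)) : Nat) : Int) := by
        rw [if_pos hch, he, show ((1 : Int) <<< (63 - (8 * r + c0))) = ((2 ^ (63 - (8 * r + c0)) : Nat) : Int) by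
          simp [Int.shiftLeft_eq], PySem.Int.bor_natCast]
      rw [hstep, show ((c0 : Int) + 1) = ((c0 + 1 : Nat) : Int) by push_cast; ring,
        ih (c0 + 1) _ ht]
      have : m ||| 2 ^ (63 - (8 * r + c0)) ||| rowW r t (c0 + 1)
          = m ||| rowW r (ch :: t) c0 := by
        rw [Nat.or_assoc]
        simp [rowW, hch]
      rw [this]

-- B's row body equals mask ||| rowW
theorem rowB_eq (r : Nat) (l : List Char) (m : Nat) (h : PreRow r 0 l) :
    (if (pyRstripDots l).isEmpty then (m : Int)
     else PySem.Int.bor (m : Int)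
        (pyRowVal (pyRstripDots l) <<< (64 - (r : Int) * 8 - ((pyRstripDots l).length : Int)).toNat))
    = ((m ||| rowW r l 0 : Nat) : Int) := by
  obtain ⟨hdec, hdots⟩ := rstrip_decomp l
  set cells := pyRstripDots l with hcells
  set ds := (l.reverse.takeWhile (· == '.')).reverse with hds
  have hdsdots : ∀ ch ∈ ds, ch = '.' := fun ch hch => hdots ch (List.mem_reverse.mp hch)
  by_cases hcne : cells = []
  · rw [if_pos (by simp [hcne])]
    have : rowW r l 0 = 0 := by
      conv_lhs => rw [hdec, hcne]
      exact rowW_dots r ds 0 (by simpa using hdsdots)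
    rw [this, Nat.or_zero]
  · have hlen : l.length = cells.length + ds.length := by rw [hdec]; simp
    have hpreC : PreRow r 0 cells := by
      intro i hi hne
      have hil : i < l.length := by omega
      have hgc : l[i]! = cells[i]! := by
        rw [getElem!_pos l i hil, getElem!_pos cells i hi, List.getElem_of_eq hdec]
        exact List.getElem_append_left hi
      exact h i hil (by rw [hgc]; exact hne)
    have hlast := rstrip_getLast_ne l (by rw [← hcells]; exact hcne)
    have h64 : 8 * r + 0 + cells.length ≤ 64 := by
      have hj : cells.length - 1 < cells.length := by
        have : cells.length ≠ 0 := fun h0 => hcne (List.eq_nil_of_length_eq_zero h0)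
        omega
      have hgl : cells.getLast hcne = cells[cells.length - 1] := List.getLast_eq_getElem hcne
      have := hpreC (cells.length - 1) hj (by
        rw [getElem!_pos cells _ hj, ← hgl]
        exact hlast)
      omega
    have hWl : rowW r l 0 = rowW r cells 0 := by
      conv_lhs => rw [hdec]
      rw [rowW_append, rowW_dots r ds (0 + cells.length) hdsdots, Nat.or_zero]
    rw [if_neg (by simpa using hcne)]
    have hval : pyRowVal cells = ((rowVN cells : Nat) : Int) := by
      have := pyRowVal_cast cells 0
      simpa [pyRowVal, rowVN] using this
    have hsh : (64 - (r : Int) * 8 - (cells.length : Int)).toNat = 64 - (8 * r + cells.length) := by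
      rw [show (64 - (r : Int) * 8 - (cells.length : Int)) = ((64 - (8 * r + cells.length) : Nat) : Int) by
        push_cast; omega]
      exact Int.toNat_natCast _
    rw [hval, hsh, show ((rowVN cells : Nat) : Int) <<< (64 - (8 * r + cells.length))
        = ((rowVN cells * 2 ^ (64 - (8 * r + cells.length)) : Nat) : Int) by simp [Int.shiftLeft_eq],
      PySem.Int.bor_natCast]
    have hexp : 64 - (8 * r + cells.length) = 64 - (8 * r + 0 + cells.length) := by omega
    rw [hexp, rowVN_mul_eq_rowW r cells 0 h64 hpreC, hWl]

set_option maxHeartbeats 1000000 in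
theorem outer_eq (bs : List String) (i m : Nat)
    (h : ∀ k, (hk : k < bs.length) → PreRow (i + k) 0 (PySem.Str.strip bs[k]).toList) :
    (PySem.List.enumerate (bs.map PySem.Str.strip) (i : Int)).foldl
      (fun mask rl =>
        (PySem.List.enumerate rl.2.toList).foldl
          (fun mask cch =>
            if cch.2 ≠ '.' then
              PySem.Int.bor mask ((1 : Int) <<< (63 - (rl.1 * 8 + cch.1)).toNat)
            else mask)
          mask) (m : Int)
    = (PySem.List.enumerate bs (i : Int)).foldl
      (fun mask rl =>
        let cells := pyRstripDots (PySem.Str.strip rl.2).toList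
        if cells.isEmpty then mask
        else PySem.Int.bor mask (pyRowVal cells <<< (64 - rl.1 * 8 - (cells.length : Int)).toNat))
      (m : Int) := by
  induction bs generalizing i m with
  | nil => rfl
  | cons b t ih =>
    simp only [List.map_cons, PySem.List.enumerate_cons, List.foldl_cons]
    have h0 := h 0 (by simp)
    rw [Nat.add_zero] at h0
    simp only [List.getElem_cons_zero] at h0
    have hA := innerA_eq i (PySem.Str.strip b).toList 0 m h0
    rw [Nat.cast_zero] at hA
    have hB := rowB_eq i (PySem.Str.strip b).toList m h0
    rw [hA, hB]
    rw [show ((i : Int) + 1) = ((i + 1 : Nat) : Int) by push_cast; ring]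
    apply ih
    intro k hk
    have := h (k + 1) (by simpa using Nat.succ_lt_succ hk)
    simpa [Nat.add_assoc, Nat.add_comm 1 k] using this

-- ===== VERDICT (by name: the statement is the Claim_ definition above) =====
set_option maxHeartbeats 1000000 in
theorem mask_from_ascii_spec : Claim_equal_mask_from_ascii := by
  intro s _ hpre
  unfold Spec_mask_from_ascii mask_from_ascii mask_from_ascii_alt
  have h := outer_eq (PySem.Str.splitlines (PySem.Str.strip s)) 0 0 (by
    intro k hk i hi hne
    have hgk : (PySem.Str.splitlines (PySem.Str.strip s))[k]!
        = (PySem.Str.splitlines (PySem.Str.strip s))[k] := getElem!_pos _ k hk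
    have := hpre k hk i (by rw [hgk]; exact hi) (by rw [hgk]; exact hne)
    omega)
  simp only [Nat.cast_zero] at h
  exact h
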